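-- pv_equiv track=rewrite | github.com/FerdinandPaar/SemTalk | utils/run_gt_semantic_beat_validation.py | _find_windows
-- ===== SOURCE A (Python) =====
-- def _find_windows(labels, target, min_len):
--     windows = []
--     in_seg = False
--     start = 0
--     for i in range(len(labels)):
--         if labels[i] == target and not in_seg:
--             start = i
--             in_seg = True
--         elif labels[i] != target and in_seg:
--             if i - start >= min_len:
--                 windows.append((start, i))
--             in_seg = False
--     if in_seg and len(labels) - start >= min_len:
--         windows.append((start, len(labels)))
--     return windows
-- ===== SOURCE B (Python) =====
-- def _find_windows(labels, target, min_len):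
--     # Stage 1: indices carrying the target label.
--     idxs = [i for i, lab in enumerate(labels) if lab == target]
--     # Stage 2: split the index list at non-consecutive gaps; each block is a window.
--     windows = []
--     k = 0
--     while k < len(idxs):
--         j = k
--         while j + 1 < len(idxs) and idxs[j + 1] == idxs[j] + 1:
--             j += 1
--         if idxs[j] - idxs[k] + 1 >= min_len:
--             windows.append((idxs[k], idxs[j] + 1))
--         k = j + 1
--     return windows
-- ===== Notes on version B (the rewrite author's own statement) =====
-- stated objective: alternative
-- what changed: A scans the labels with an in_seg flag and a trailing-segment special case; B works in two stages over a different structure: it first extracts the list of indices whose label equals the target, then splits that index list at non-consecutive gaps and emits each sufficiently long block as a window.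
import Mathlib
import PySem

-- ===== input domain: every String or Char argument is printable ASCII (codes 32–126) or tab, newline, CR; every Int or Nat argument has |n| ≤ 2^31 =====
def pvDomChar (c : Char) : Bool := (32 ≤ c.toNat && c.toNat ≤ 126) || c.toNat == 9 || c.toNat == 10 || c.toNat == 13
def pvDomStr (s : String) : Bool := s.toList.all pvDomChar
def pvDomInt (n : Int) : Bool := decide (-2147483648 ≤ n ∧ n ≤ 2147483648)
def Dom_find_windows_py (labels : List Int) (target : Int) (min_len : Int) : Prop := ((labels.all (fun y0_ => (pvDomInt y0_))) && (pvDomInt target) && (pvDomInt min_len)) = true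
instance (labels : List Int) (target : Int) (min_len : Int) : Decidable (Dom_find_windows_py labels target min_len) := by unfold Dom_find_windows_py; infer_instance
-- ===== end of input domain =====

-- B replaces A's in_seg/start state machine over the labels by a two-stage pass: first
-- extract the list of indices carrying the target label, then split that index list at
-- non-consecutive gaps; objective: alternative decomposition, same O(n).

-- ===== PORT A =====
-- literal port of A's index loop: state (windows, in_seg, start), then the trailing check
def find_windows_py (labels : List Int) (target : Int) (min_len : Int) : List (Int × Int) :=
  let n : Int := labels.length
  let st := (PySem.List.pyRange 0 n 1).foldl
    (fun (st : List (Int × Int) × Bool × Int) i =>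
      let x := PySem.List.pyGetD labels i 0   -- labels[i]; i always in range here
      if x == target && !st.2.1 then (st.1, true, i)
      else if x != target && st.2.1 then
        ((if min_len ≤ i - st.2.2 then st.1 ++ [(st.2.2, i)] else st.1), false, st.2.2)
      else st)
    ([], false, 0)
  if st.2.1 && decide (min_len ≤ n - st.2.2) then st.1 ++ [(st.2.2, n)] else st.1

-- ===== PORT B =====
-- inner while loop of Source B: advance j while the next stored index is consecutive;
-- returns (idxs[j], remaining suffix of the index list after j)
def runSplit : Int → List Int → Int × List Int
  | last, [] => (last, [])
  | last, j :: rest => if j == last + 1 then runSplit j rest else (last, j :: rest)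

theorem runSplit_len (last : Int) (l : List Int) : (runSplit last l).2.length ≤ l.length := by
  induction l generalizing last with
  | nil => simp [runSplit]
  | cons j rest ih =>
    simp only [runSplit]
    split
    · exact le_trans (ih j) (Nat.le_succ _)
    · simp

-- outer while loop of Source B over the index list
def buildWindows (min_len : Int) : List Int → List (Int × Int)
  | [] => []
  | k :: rest =>
    let p := runSplit k rest
    (if min_len ≤ p.1 - k + 1 then [(k, p.1 + 1)] else []) ++ buildWindows min_len p.2
termination_by l => l.length
decreasing_by
  exact Nat.lt_succ_of_le (runSplit_len k rest)

def find_windows_py_alt (labels : List Int) (target : Int) (min_len : Int) : List (Int × Int) :=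
  let idxs := ((PySem.List.enumerate labels 0).filter (fun p => p.2 == target)).map (·.1)
  buildWindows min_len idxs

-- ===== PRECONDITION & SPEC =====
def Spec_find_windows_py (labels : List Int) (target : Int) (min_len : Int) (out : List (Int × Int)) : Prop := out = find_windows_py_alt labels target min_len
instance (labels : List Int) (target : Int) (min_len : Int) (out : List (Int × Int)) : Decidable (Spec_find_windows_py labels target min_len out) := by unfold Spec_find_windows_py; infer_instance

-- ===== CLAIM (what is proved, stated in full; the proofs are below) =====
def Claim_equal_find_windows_py : Prop := ∀ (labels : List Int) (target : Int) (min_len : Int), Dom_find_windows_py labels target min_len → Spec_find_windows_py labels target min_len (find_windows_py labels target min_len)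

-- ===== LEMMAS AND PROOFS =====

theorem buildWindows_cons (min_len k : Int) (rest : List Int) :
    buildWindows min_len (k :: rest)
      = (if min_len ≤ (runSplit k rest).1 - k + 1 then [(k, (runSplit k rest).1 + 1)] else [])
          ++ buildWindows min_len (runSplit k rest).2 := by
  rw [buildWindows]


-- A's loop body, over (index, value) pairs
def stepA (target min_len : Int) (st : List (Int × Int) × Bool × Int) (p : Int × Int) :
    List (Int × Int) × Bool × Int :=
  if p.2 == target && !st.2.1 then (st.1, true, p.1)
  else if p.2 != target && st.2.1 then
    ((if min_len ≤ p.1 - st.2.2 then st.1 ++ [(st.2.2, p.1)] else st.1), false, st.2.2)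
  else st

-- the windows A still produces from position s with state (start, inseg)
def specA (target min_len : Int) : List Int → Int → Int → Bool → List (Int × Int)
  | [], s, start, inseg =>
    if inseg && decide (min_len ≤ s - start) then [(start, s)] else []
  | x :: xs, s, start, inseg =>
    if x == target && !inseg then specA target min_len xs (s+1) s true
    else if x != target && inseg then
      (if min_len ≤ s - start then [(start, s)] else []) ++
        specA target min_len xs (s+1) start false
    else specA target min_len xs (s+1) start inseg

def finishA (min_len n : Int) (st : List (Int × Int) × Bool × Int) : List (Int × Int) :=
  if st.2.1 && decide (min_len ≤ n - st.2.2) then st.1 ++ [(st.2.2, n)] else st.1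

theorem foldA_spec (target min_len : Int) (l : List Int) (s start : Int) (inseg : Bool)
    (ws : List (Int × Int)) :
    finishA min_len (s + l.length) ((PySem.List.enumerate l s).foldl (stepA target min_len) (ws, inseg, start))
      = ws ++ specA target min_len l s start inseg := by
  induction l generalizing s start inseg ws with
  | nil => simp [finishA, specA, PySem.List.enumerate_nil]; split <;> simp
  | cons x xs ih =>
    rw [PySem.List.enumerate_cons]
    simp only [List.foldl_cons]
    have harith : s + ((x :: xs).length : Int) = (s + 1) + (xs.length : Int) := by
      simp; ring
    rw [harith]
    by_cases h1 : (x == target && !inseg) = true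
    · simp only [stepA, specA, h1, if_true]
      exact ih (s+1) s true ws
    · rw [specA, if_neg h1]
      by_cases h2 : (x != target && inseg) = true
      · simp only [stepA]
        rw [if_neg h1, if_pos h2]
        split
        · rw [ih (s+1) start false (ws ++ [(start, s)])]
          simp
        · rw [ih (s+1) start false ws]
          simp
      · simp only [stepA]
        rw [if_neg h1, if_neg h2, if_neg h2]
        exact ih (s+1) start inseg ws

-- specA with inseg = false does not depend on start
theorem specA_start_irrel (target min_len : Int) (l : List Int) (s a b : Int) :
    specA target min_len l s a false = specA target min_len l s b false := by
  induction l generalizing s with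
  | nil => simp [specA]
  | cons x xs ih =>
    simp only [specA]
    by_cases h1 : (x == target) = true
    · simp [h1]
    · simp [h1]
      exact ih (s+1)

-- crossing a run of target labels while in a segment
theorem specA_run_target (target min_len : Int) (r rest : List Int)
    (hr : ∀ y ∈ r, y = target) (s start : Int) :
    specA target min_len (r ++ rest) s start true
      = specA target min_len rest (s + r.length) start true := by
  induction r generalizing s with
  | nil => simp
  | cons y ys ih =>
    have hy : y = target := hr y (by simp)
    subst hy
    rw [List.cons_append, specA, if_neg (by simp), if_neg (by simp)]
    rw [ih (fun z hz => hr z (by simp [hz])) (s+1)]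
    rw [show s + 1 + (ys.length : Int) = s + ((y :: ys).length : Int) from by
      simp only [List.length_cons]; push_cast; ring]

-- closing a segment: the head of l (if any) is not target
theorem specA_close (target min_len : Int) (l : List Int)
    (hl : l = [] ∨ ∃ y ys, l = y :: ys ∧ y ≠ target) (s start : Int) :
    specA target min_len l s start true
      = (if min_len ≤ s - start then [(start, s)] else []) ++
        specA target min_len l s start false := by
  rcases hl with h | ⟨y, ys, h, hy⟩
  · subst h; simp only [specA]
    split <;> simp_all
  · subst h
    have hyb : (y == target) = false := by simpa using hy
    rw [specA, if_neg (by simp), if_pos (by simpa using hy)]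
    simp [specA, hyb]

-- the index list B's stage 1 extracts, with offset s
def tIdxs (target : Int) (l : List Int) (s : Int) : List Int :=
  ((PySem.List.enumerate l s).filter (fun p => p.2 == target)).map (·.1)

theorem tIdxs_nil (target s : Int) : tIdxs target [] s = [] := by
  simp [tIdxs, PySem.List.enumerate_nil]

theorem tIdxs_cons (target : Int) (x : Int) (xs : List Int) (s : Int) :
    tIdxs target (x :: xs) s
      = (if x == target then [s] else []) ++ tIdxs target xs (s + 1) := by
  simp only [tIdxs, PySem.List.enumerate_cons, List.filter_cons]
  split <;> simp

theorem tIdxs_ge (target : Int) (l : List Int) (s : Int) :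
    ∀ j ∈ tIdxs target l s, s ≤ j := by
  induction l generalizing s with
  | nil => simp [tIdxs_nil]
  | cons x xs ih =>
    intro j hj
    rw [tIdxs_cons] at hj
    rcases List.mem_append.mp hj with h | h
    · split at h <;> simp_all
    · exact le_trans (by omega) (ih (s + 1) j h)

-- the run of consecutive integers s, s+1, …, s+m-1
def consec (a : Int) : Nat → List Int
  | 0 => []
  | m + 1 => a :: consec (a + 1) m

theorem tIdxs_run_target (target : Int) (r rest : List Int)
    (hr : ∀ y ∈ r, y = target) (s : Int) :
    tIdxs target (r ++ rest) s = consec s r.length ++ tIdxs target rest (s + r.length) := by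
  induction r generalizing s with
  | nil => simp [consec]
  | cons y ys ih =>
    have hy : (y == target) = true := by simpa using hr y (by simp)
    rw [List.cons_append, tIdxs_cons, hy]
    rw [ih (fun z hz => hr z (by simp [hz])) (s + 1)]
    simp only [List.length_cons, consec]
    push_cast
    rw [show s + ((ys.length : Int) + 1) = s + 1 + (ys.length : Int) from by ring]
    simp

theorem runSplit_consec (m : Nat) (last : Int) (tail : List Int)
    (ht : ∀ j ∈ tail, last + m + 1 < j) :
    runSplit last (consec (last + 1) m ++ tail) = (last + m, tail) := by
  induction m generalizing last with
  | zero =>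
    cases tail with
    | nil => simp [consec, runSplit]
    | cons j rest =>
      have := ht j (by simp)
      simp only [consec, List.nil_append, runSplit]
      rw [if_neg (by simp; omega)]
      simp
  | succ m ih =>
    simp only [consec, List.cons_append, runSplit]
    rw [if_pos (by simp)]
    have := ih (last + 1) (fun j hj => by have := ht j hj; push_cast at *; omega)
    rw [show last + 1 + (m : Int) = last + ((m : Nat) + 1 : Nat) from by push_cast; ring] at this
    exact this

-- the heart of the equivalence: A's residual spec (out of segment) = B on the index list
theorem specA_eq_build (target min_len : Int) (l : List Int) (s start : Int) :
    specA target min_len l s start false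
      = buildWindows min_len (tIdxs target l s) := by
  induction hn : l.length using Nat.strong_induction_on generalizing l s start with
  | _ n ih =>
  match l with
  | [] => simp [specA, tIdxs_nil, buildWindows]
  | x :: xs =>
    have hsplit : xs = xs.takeWhile (· == x) ++ xs.dropWhile (· == x) :=
      (List.takeWhile_append_dropWhile (p := (· == x)) (l := xs)).symm
    have hrall : ∀ y ∈ xs.takeWhile (· == x), y = x := by
      intro y hy
      simpa using List.mem_takeWhile_imp hy
    have hresthead : xs.dropWhile (· == x) = [] ∨
        ∃ y ys, xs.dropWhile (· == x) = y :: ys ∧ y ≠ x := by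
      rcases hcase : xs.dropWhile (· == x) with _ | ⟨y, ys⟩
      · exact Or.inl rfl
      · refine Or.inr ⟨y, ys, rfl, ?_⟩
        have h := List.head?_dropWhile_not (p := (· == x)) (l := xs)
        rw [hcase] at h
        simpa using h
    have hlenrest : (xs.dropWhile (· == x)).length < n := by
      subst hn
      have := List.length_dropWhile_le (p := (· == x)) (l := xs)
      simp only [List.length_cons]
      omega
    by_cases hx : x = target
    · -- head is target: one run of length 1 + |takeWhile|
      subst hx
      set r := xs.takeWhile (· == x) with hrdef
      set rest := xs.dropWhile (· == x) with hrestdef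
      have hresthead' : rest = [] ∨ ∃ y ys, rest = y :: ys ∧ y ≠ x := hresthead
      -- left side
      rw [specA, if_pos (by simp)]
      rw [hsplit]
      rw [specA_run_target x min_len r rest (fun y hy => hrall y hy) (s+1) s]
      rw [specA_close x min_len rest hresthead' _ s]
      rw [specA_start_irrel x min_len rest _ _ start]
      rw [ih _ hlenrest _ _ start rfl]
      -- right side
      rw [← List.cons_append]
      rw [tIdxs_run_target x (x :: r) rest (by
        intro y hy
        rcases List.mem_cons.mp hy with h | h
        · exact h
        · exact hrall y h) s]
      simp only [List.length_cons, consec]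
      rw [List.cons_append, buildWindows_cons]
      rw [show s + ((r.length + 1 : Nat) : Int) = s + 1 + (r.length : Int) from by push_cast; ring]
      have htail : ∀ j ∈ tIdxs x rest (s + ((r.length : Int) + 1)), s + r.length + 1 < j := by
        intro j hj
        rcases hresthead' with h | ⟨y, ys, h, hy⟩
        · simp [h, tIdxs_nil] at hj
        · rw [h, tIdxs_cons, if_neg (by simpa using hy)] at hj
          have := tIdxs_ge x ys (s + ((r.length : Int) + 1) + 1) j (by simpa using hj)
          omega
      have hrs := runSplit_consec r.length s
        (tIdxs x rest (s + ((r.length : Int) + 1))) htail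
      rw [show s + ((r.length : Int) + 1) = s + 1 + (r.length : Int) from by ring] at *
      rw [hrs]
      have harith1 : s + (r.length : Int) - s + 1 = s + 1 + (r.length : Int) - s := by ring
      have harith2 : s + (r.length : Int) + 1 = s + 1 + (r.length : Int) := by ring
      rw [harith1, harith2]
    · -- head not target: both sides skip it
      have hxb : (x == target) = false := by simpa using hx
      rw [specA, if_neg (by simp [hxb]), if_neg (by simp)]
      rw [tIdxs_cons, hxb]
      simp only [List.nil_append, Bool.false_eq_true, if_false]
      have hlen : xs.length < n := by subst hn; simp
      exact ih _ hlen _ _ start rfl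

-- ===== VERDICT (by name: the statement is the Claim_ definition above) =====
theorem find_windows_py_spec : Claim_equal_find_windows_py := by
  intro labels target min_len _
  unfold Spec_find_windows_py
  have h1 := foldA_spec target min_len labels 0 0 false []
  rw [show (0:Int) + (labels.length : Int) = (labels.length : Int) from by ring,
      List.nil_append] at h1
  have hA : find_windows_py labels target min_len
      = finishA min_len (labels.length : Int)
          ((PySem.List.enumerate labels 0).foldl (stepA target min_len) ([], false, 0)) := by
    rw [PySem.List.enumerate_eq_map_pyRange (xs := labels) (d := (0 : Int)), List.foldl_map]
    rfl
  rw [hA, h1]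
  exact specA_eq_build target min_len labels 0 0
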